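-- pv_equiv track=rewrite | github.com/dessertivore/advent-of-code-2023 | day-14/day_14.py | move_rocks_north
-- ===== SOURCE A (Python) =====
-- def move_rocks_north(round_rocks: set, rocks_by_y: dict) -> set:
--     """
--     Move all round rocks ("O") as far up as possible.
--     """
--     new_round_rocks: set = set()
--     for round_rock in round_rocks:
--         x = round_rock[0]
--         y = round_rock[1]
--         closest_rock_x = 0
--         no_rocks_in_way = True
--         if y in rocks_by_y.keys():  # check if any rocks on same y coord
--             for rock in rocks_by_y[y]:
--                 # go through all the cube rocks and find the one closest on x axis, and on same y axis
--                 if rock[0] < x: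
--                     no_rocks_in_way = False
--                     closest_rock_x = max(closest_rock_x, rock[0])
--         if no_rocks_in_way:  # if no rocks in way, go to x=0, unless another rock there
--             while (
--                 closest_rock_x,
--                 y,
--             ) in new_round_rocks:  # if there is already a rock in that place, it will have to go behind it
--                 closest_rock_x += 1
--             new_round_rocks.add((closest_rock_x, y))
--         else:
--             while (
--                 closest_rock_x + 1,
--                 y,
--             ) in new_round_rocks:  # if there is already a rock in that place, it will have to go behind it
--                 closest_rock_x += 1
--             new_round_rocks.add((closest_rock_x + 1, y))
--     return new_round_rocks
-- ===== SOURCE B (Python) =====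
-- def move_rocks_north(round_rocks: set, rocks_by_y: dict) -> set:
--     """
--     Move all round rocks ("O") as far up as possible.
--
--     The cube rocks of each row are sorted once; the nearest cube left of each
--     round rock is found by binary search, and occupied slots are kept per row.
--     """
--     sorted_cubes: dict = {}
--     for yy, cubes in rocks_by_y.items():
--         if yy not in sorted_cubes:
--             sorted_cubes[yy] = sorted(c[0] for c in cubes)
--     occupied: dict = {}
--     placed: set = set()
--     for x, y in round_rocks:
--         xs = sorted_cubes.get(y, [])
--         # binary search: leftmost index lo with xs[lo] >= x
--         lo, hi = 0, len(xs)
--         while lo < hi: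
--             mid = (lo + hi) // 2
--             if xs[mid] < x:
--                 lo = mid + 1
--             else:
--                 hi = mid
--         start = 0 if lo == 0 else xs[lo - 1] + 1
--         row = occupied.setdefault(y, set())
--         while start in row:
--             start += 1
--         row.add(start)
--         placed.add((start, y))
--     return placed
-- ===== Notes on version B (the rewrite author's own statement) =====
-- stated objective: alternative
-- what changed: Instead of scanning every cube rock of a row for each round rock, B sorts each row's cube x-coordinates once and finds the nearest cube left of a rock by hand-written binary search, keeping occupied slots in a per-row set; it trades A's per-rock row scan for a sort-once index (a win only when rows hold many cubes, which the timing inputs do not).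
-- intended difference: On round rocks whose nearest cube to the left in their row sits at a negative x, A clamps that cube's coordinate to 0 and places the rock at x >= 1, while B slides the rock to just behind the cube (cube x + 1); B's is the intended sliding behaviour, A's clamp is an accident of its closest_rock_x = 0 initialisation. — e.g. on move_rocks_north([(0, 0)], [(0, [(-2, 0)])]): A returns [(1, 0)], B returns [(-1, 0)]
import Mathlib
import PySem

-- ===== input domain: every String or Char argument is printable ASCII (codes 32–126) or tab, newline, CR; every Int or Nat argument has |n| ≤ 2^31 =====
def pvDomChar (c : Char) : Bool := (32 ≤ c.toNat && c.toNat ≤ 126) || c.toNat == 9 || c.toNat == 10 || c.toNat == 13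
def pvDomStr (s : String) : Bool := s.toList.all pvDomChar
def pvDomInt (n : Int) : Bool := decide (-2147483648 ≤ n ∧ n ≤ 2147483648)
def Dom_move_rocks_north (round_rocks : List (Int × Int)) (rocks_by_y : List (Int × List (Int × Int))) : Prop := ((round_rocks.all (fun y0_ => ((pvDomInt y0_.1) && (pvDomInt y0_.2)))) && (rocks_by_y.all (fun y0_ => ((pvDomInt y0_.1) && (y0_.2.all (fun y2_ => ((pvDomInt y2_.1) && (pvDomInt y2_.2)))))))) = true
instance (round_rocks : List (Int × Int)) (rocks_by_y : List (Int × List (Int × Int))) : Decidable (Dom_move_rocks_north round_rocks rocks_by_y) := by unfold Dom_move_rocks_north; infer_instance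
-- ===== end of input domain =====

-- B sorts each row's cube rocks once and finds the nearest cube left of a round rock by
-- binary search instead of A's per-rock scan of the whole row, keeping occupied slots
-- per row (objective: alternative algorithm; same return value except on D_, no mutation).

-- ===== PORT A =====
-- A's 'while (…, y) in new_round_rocks: … += 1' loop; the fuel (never exhausted) makes it total
def pvProbeA (s : List (Int × Int)) (y : Int) : Nat → Int → Int
  | 0, p => p
  | f+1, p => if (p, y) ∈ s then pvProbeA s y f (p+1) else p

-- body of A's 'for round_rock in round_rocks' loop
def pvStepA (rocks_by_y : List (Int × List (Int × Int))) (new_round_rocks : PySem.Set (Int × Int)) (round_rock : Int × Int) : PySem.Set (Int × Int) :=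
  let x := round_rock.1
  let y := round_rock.2
  let st :=
    match (PySem.Dict.mk rocks_by_y).get? y with
    | none => (true, (0 : Int))
    | some cubes =>
        cubes.foldl (fun (st : Bool × Int) (rock : Int × Int) => if rock.1 < x then (false, max st.2 rock.1) else st) (true, (0 : Int))
  if st.1 then
    let p := pvProbeA new_round_rocks y (new_round_rocks.length + 1) st.2
    PySem.Set.add new_round_rocks (p, y)
  else
    let p := pvProbeA new_round_rocks y (new_round_rocks.length + 1) (st.2 + 1)
    PySem.Set.add new_round_rocks (p, y)

def move_rocks_north (round_rocks : List (Int × Int)) (rocks_by_y : List (Int × List (Int × Int))) : List (Int × Int) :=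
  round_rocks.foldl (pvStepA rocks_by_y) PySem.Set.empty

-- ===== PORT B =====
-- B's hand-written binary search (leftmost index lo with xs[lo] ≥ x); fuel (never exhausted) makes it total
def pvBisect (xs : List Int) (x : Int) : Nat → Nat → Nat → Nat
  | 0, lo, _hi => lo
  | f+1, lo, hi =>
    if lo < hi then
      let mid := (lo + hi) / 2
      if xs.getD mid 0 < x then pvBisect xs x f (mid+1) hi
      else pvBisect xs x f lo mid
    else lo

-- B's 'while start in row: start += 1' loop
def pvProbeB (row : PySem.Set Int) : Nat → Int → Int
  | 0, p => p
  | f+1, p => if p ∈ row then pvProbeB row f (p+1) else p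

-- B's first loop: each row's cube x-coordinates, sorted once (first occurrence of a key wins)
def pvSortedCubes (rocks_by_y : List (Int × List (Int × Int))) : PySem.Dict Int (List Int) :=
  rocks_by_y.foldl
    (fun d kv =>
      if d.contains kv.1 then d
      else d.insert kv.1 (PySem.List.sorted (kv.2.map Prod.fst) (fun v => v)))
    PySem.Dict.empty

-- body of B's 'for x, y in round_rocks' loop (xs[lo-1] is in range whenever lo ≠ 0, so getD is exact)
def pvPlaceB (sc : PySem.Dict Int (List Int)) (st : PySem.Dict Int (PySem.Set Int) × PySem.Set (Int × Int)) (r : Int × Int) :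
    PySem.Dict Int (PySem.Set Int) × PySem.Set (Int × Int) :=
  let x := r.1
  let y := r.2
  let xs := sc.getD y []
  let lo := pvBisect xs x xs.length 0 xs.length
  let start : Int := if lo = 0 then 0 else xs.getD (lo - 1) 0 + 1
  let row := st.1.getD y PySem.Set.empty
  let p := pvProbeB row (row.length + 1) start
  (st.1.insert y (row.add p), st.2.add (p, y))

def move_rocks_north_alt (round_rocks : List (Int × Int)) (rocks_by_y : List (Int × List (Int × Int))) : List (Int × Int) :=
  let sc := pvSortedCubes rocks_by_y
  (round_rocks.foldl (pvPlaceB sc) (PySem.Dict.empty, PySem.Set.empty)).2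

-- ===== PRECONDITION & SPEC =====
-- On round rocks whose nearest cube to the left (same row) has a NEGATIVE x, A clamps that
-- cube's coordinate to 0 and places the rock at x ≥ 1, while B slides it just behind the cube;
-- B's value is the intended sliding behaviour, A's clamp is an accident of its 'closest_rock_x = 0' initialisation.
def pvBadRock (rocks_by_y : List (Int × List (Int × Int))) (r : Int × Int) : Bool :=
  match (PySem.Dict.mk rocks_by_y).get? r.2 with
  | none => false
  | some cubes =>
      let below := (cubes.map Prod.fst).filter (fun c => decide (c < r.1))
      !below.isEmpty && below.all (fun c => decide (c < 0))

def D_move_rocks_north (round_rocks : List (Int × Int)) (rocks_by_y : List (Int × List (Int × Int))) : Prop :=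
  round_rocks.any (pvBadRock rocks_by_y) = true
instance (round_rocks : List (Int × Int)) (rocks_by_y : List (Int × List (Int × Int))) : Decidable (D_move_rocks_north round_rocks rocks_by_y) := by unfold D_move_rocks_north; infer_instance

def Spec_move_rocks_north (round_rocks : List (Int × Int)) (rocks_by_y : List (Int × List (Int × Int))) (out : List (Int × Int)) : Prop := ¬ D_move_rocks_north round_rocks rocks_by_y → out = move_rocks_north_alt round_rocks rocks_by_y
instance (round_rocks : List (Int × Int)) (rocks_by_y : List (Int × List (Int × Int))) (out : List (Int × Int)) : Decidable (Spec_move_rocks_north round_rocks rocks_by_y out) := by unfold Spec_move_rocks_north; infer_instance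

def pvDiffWitness_move_rocks_north : (List (Int × Int)) × (List (Int × List (Int × Int))) := ([(0, 0)], [(0, [(-2, 0)])])
def pvDiffWitnessOut_move_rocks_north : (List (Int × Int)) × (List (Int × Int)) := ([(1, 0)], [(-1, 0)])

-- ===== CLAIM (what is proved, stated in full; the proofs are below) =====
def Claim_unchanged_move_rocks_north : Prop := ∀ (round_rocks : List (Int × Int)) (rocks_by_y : List (Int × List (Int × Int))), Dom_move_rocks_north round_rocks rocks_by_y → Spec_move_rocks_north round_rocks rocks_by_y (move_rocks_north round_rocks rocks_by_y)
def Claim_changed_move_rocks_north : Prop := Dom_move_rocks_north (pvDiffWitness_move_rocks_north.1) (pvDiffWitness_move_rocks_north.2) ∧ D_move_rocks_north (pvDiffWitness_move_rocks_north.1) (pvDiffWitness_move_rocks_north.2) ∧ move_rocks_north (pvDiffWitness_move_rocks_north.1) (pvDiffWitness_move_rocks_north.2) = pvDiffWitnessOut_move_rocks_north.1 ∧ move_rocks_north_alt (pvDiffWitness_move_rocks_north.1) (pvDiffWitness_move_rocks_north.2) = pvDiffWitnessOut_move_rocks_north.2 ∧ pvDiffWitnessOut_move_rocks_north.1 ≠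 pvDiffWitnessOut_move_rocks_north.2

-- ===== LEMMAS AND PROOFS =====

-- A's inner fold over a row's cubes computes (no cube below x, running max of those below x)
theorem pvFoldA_spec (x : Int) (cubes : List (Int × Int)) (b : Bool) (m : Int) :
    cubes.foldl (fun (st : Bool × Int) (rock : Int × Int) => if rock.1 < x then (false, max st.2 rock.1) else st) (b, m)
      = (b && ((cubes.map Prod.fst).filter (fun c => decide (c < x))).isEmpty,
         ((cubes.map Prod.fst).filter (fun c => decide (c < x))).foldl max m) := by
  induction cubes generalizing b m with
  | nil => simp
  | cons h t ih =>
    by_cases hc : h.1 < x <;> simp [hc, ih]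

-- on a ≤-sorted list, filtering (· < x) is taking the prefix
theorem filter_eq_takeWhile_of_sorted (xs : List Int) (x : Int) (h : xs.Pairwise (· ≤ ·)) :
    xs.filter (fun c => decide (c < x)) = xs.takeWhile (fun c => decide (c < x)) := by
  induction xs with
  | nil => rfl
  | cons a t ih =>
    rcases List.pairwise_cons.1 h with ⟨ha, ht⟩
    by_cases hc : a < x
    · simp [hc, ih ht]
    · simp only [List.filter_cons, List.takeWhile_cons, hc, decide_false, Bool.false_eq_true,
        if_false]
      rw [List.filter_eq_nil_iff.2]
      intro y hy
      simp only [decide_eq_true_eq]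
      intro hyx
      exact hc (lt_of_le_of_lt (ha y hy) hyx)

-- a left fold of max over a ≤-sorted nonempty list is max with its last element
theorem foldl_max_sorted (W : List Int) (a : Int) (h : W.Pairwise (· ≤ ·)) (hne : W ≠ []) :
    W.foldl max a = max a (W.getLast hne) := by
  induction W generalizing a with
  | nil => exact absurd rfl hne
  | cons w t ih =>
    rcases List.pairwise_cons.1 h with ⟨hw, ht⟩
    cases t with
    | nil => simp
    | cons u s =>
      rw [List.foldl_cons, ih (max a w) ht (by simp), List.getLast_cons_cons]
      have : w ≤ (u :: s).getLast (by simp) := hw _ (List.getLast_mem _)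
      rw [max_assoc]
      congr 1
      omega

-- every member of a ≤-sorted nonempty list is at most its last element
theorem mem_le_getLast_of_sorted (W : List Int) (h : W.Pairwise (· ≤ ·)) (hne : W ≠ [])
    (c : Int) (hc : c ∈ W) : c ≤ W.getLast hne := by
  rcases List.getElem_of_mem hc with ⟨i, hi, rfl⟩
  rw [List.getLast_eq_getElem hne]
  rcases Nat.lt_or_ge i (W.length - 1) with hlt | hge
  · exact List.pairwise_iff_getElem.1 h i (W.length - 1) hi (by omega) hlt
  · have : i = W.length - 1 := by omega
    subst this
    exact le_refl _

-- B's binary search finds the length of the (· < x)-prefix of a sorted list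
theorem pvBisect_spec (xs : List Int) (x : Int) (h : xs.Pairwise (· ≤ ·)) :
    ∀ (f lo hi : Nat), lo ≤ (xs.takeWhile (fun c => decide (c < x))).length →
      (xs.takeWhile (fun c => decide (c < x))).length ≤ hi → hi ≤ xs.length → hi - lo ≤ f →
      pvBisect xs x f lo hi = (xs.takeWhile (fun c => decide (c < x))).length := by
  set W := xs.takeWhile (fun c => decide (c < x)) with hW
  set t := W.length with ht
  have hxs : W ++ xs.dropWhile (fun c => decide (c < x)) = xs := List.takeWhile_append_dropWhile
  have hlen : t + (xs.dropWhile (fun c => decide (c < x))).length = xs.length := by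
    have := congrArg List.length hxs
    simpa [ht] using this
  have hlt : ∀ i (hi : i < xs.length), i < t → xs[i] < x := by
    intro i hilen hit
    have e : xs[i] = (W ++ xs.dropWhile (fun c => decide (c < x)))[i]'(by rw [hxs]; omega) :=
      List.getElem_of_eq hxs.symm hilen
    rw [e, List.getElem_append_left (by omega)]
    have := List.mem_takeWhile_imp (l := xs) (p := fun c => decide (c < x)) (List.getElem_mem (l := W) (by omega))
    simpa using this
  have hge : ∀ i (hi : i < xs.length), t ≤ i → ¬ xs[i] < x := by
    intro i hilen hti
    have hxt : ∀ (htl : t < xs.length), ¬ xs[t]'htl < x := by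
      intro htl
      have hd : xs.dropWhile (fun c => decide (c < x)) ≠ [] := by
        intro hnil
        rw [hnil] at hlen
        simp at hlen
        omega
      have hhead : ¬ ((xs.dropWhile (fun c => decide (c < x))).head hd < x) := by
        have := List.head_dropWhile_not (p := fun c => decide (c < x)) (l := xs) hd
        simpa using this
      have e : xs[t]'htl = (W ++ xs.dropWhile (fun c => decide (c < x)))[t]'(by rw [hxs]; omega) :=
        List.getElem_of_eq hxs.symm htl
      rw [e, List.getElem_append_right (by omega)]
      simpa [ht, List.getElem_zero_eq_head] using hhead
    rcases Nat.eq_or_lt_of_le hti with heq | hlt2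
    · subst heq; exact hxt hilen
    · intro hcon
      have h1 : xs[t]'(by omega) ≤ xs[i] := List.pairwise_iff_getElem.1 h t i (by omega) hilen hlt2
      exact hxt (by omega) (lt_of_le_of_lt h1 hcon)
  intro f
  induction f with
  | zero =>
    intro lo hi h1 h2 h3 h4
    simp only [pvBisect]
    omega
  | succ f ih =>
    intro lo hi h1 h2 h3 h4
    rw [pvBisect]
    by_cases hlohi : lo < hi
    · rw [if_pos hlohi]
      by_cases hc : xs.getD ((lo+hi)/2) 0 < x
      · rw [if_pos hc]
        have : (lo+hi)/2 < t := by
          by_contra hcon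
          have hg := hge ((lo+hi)/2) (by omega) (by omega)
          rw [List.getD_eq_getElem?_getD, List.getElem?_eq_getElem (by omega)] at hc
          simp at hc
          exact hg hc
        exact ih ((lo+hi)/2+1) hi (by omega) h2 h3 (by omega)
      · rw [if_neg hc]
        have : t ≤ (lo+hi)/2 := by
          by_contra hcon
          have hl := hlt ((lo+hi)/2) (by omega) (by omega)
          rw [List.getD_eq_getElem?_getD, List.getElem?_eq_getElem (by omega)] at hc
          simp at hc
          omega
        exact ih lo ((lo+hi)/2) h1 (by omega) (by omega) (by omega)
    · rw [if_neg hlohi]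
      omega

-- both while-loops walk the same occupancy structure to the same free slot
theorem probe_eq (s : List (Int × Int)) (row : List Int) (y : Int)
    (hmem : ∀ p : Int, (p, y) ∈ s ↔ p ∈ row) :
    ∀ (n : Nat) (start : Int) (f₁ f₂ : Nat), n < f₁ → n < f₂ → (start + n, y) ∉ s →
      pvProbeA s y f₁ start = pvProbeB row f₂ start := by
  intro n
  induction n with
  | zero =>
    intro start f₁ f₂ h1 h2 hfree
    obtain ⟨g₁, rfl⟩ := Nat.exists_eq_succ_of_ne_zero (by omega : f₁ ≠ 0)
    obtain ⟨g₂, rfl⟩ := Nat.exists_eq_succ_of_ne_zero (by omega : f₂ ≠ 0)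
    simp only [Nat.cast_zero, add_zero] at hfree
    rw [pvProbeA, pvProbeB, if_neg hfree, if_neg (fun hm => hfree ((hmem start).2 hm))]
  | succ n ih =>
    intro start f₁ f₂ h1 h2 hfree
    obtain ⟨g₁, rfl⟩ := Nat.exists_eq_succ_of_ne_zero (by omega : f₁ ≠ 0)
    obtain ⟨g₂, rfl⟩ := Nat.exists_eq_succ_of_ne_zero (by omega : f₂ ≠ 0)
    rw [pvProbeA, pvProbeB]
    by_cases hm : (start, y) ∈ s
    · rw [if_pos hm, if_pos ((hmem start).1 hm)]
      exact ih (start + 1) g₁ g₂ (by omega) (by omega) (by rw [show start + 1 + (n : Int) = start + (n + 1 : Nat) by push_cast; ring]; exact hfree)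
    · rw [if_neg hm, if_neg (fun hr => hm ((hmem start).2 hr))]

-- A's while-loop stops on a slot that is still free
theorem probeA_free (s : List (Int × Int)) (y : Int) :
    ∀ (n : Nat) (start : Int) (f : Nat), n < f → (start + n, y) ∉ s →
      (pvProbeA s y f start, y) ∉ s := by
  intro n
  induction n with
  | zero =>
    intro start f h1 hfree
    obtain ⟨g, rfl⟩ := Nat.exists_eq_succ_of_ne_zero (by omega : f ≠ 0)
    simp only [Nat.cast_zero, add_zero] at hfree
    rw [pvProbeA, if_neg hfree]
    exact hfree
  | succ n ih =>
    intro start f h1 hfree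
    obtain ⟨g, rfl⟩ := Nat.exists_eq_succ_of_ne_zero (by omega : f ≠ 0)
    rw [pvProbeA]
    by_cases hm : (start, y) ∈ s
    · rw [if_pos hm]
      exact ih (start + 1) g (by omega) (by rw [show start + 1 + (n : Int) = start + (n + 1 : Nat) by push_cast; ring]; exact hfree)
    · rw [if_neg hm]
      exact hm

-- among length+1 distinct candidates at least one misses the list
theorem exists_free {α : Type} [DecidableEq α] (s : List α) (g : Nat → α)
    (hinj : Function.Injective g) : ∃ n, n < s.length + 1 ∧ g n ∉ s := by
  by_contra hcon
  push Not at hcon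
  have hsub : ((List.range (s.length + 1)).map g) ⊆ s := by
    intro a ha
    rcases List.mem_map.1 ha with ⟨n, hn, rfl⟩
    exact hcon n (List.mem_range.1 hn)
  have hnd2 : ((List.range (s.length + 1)).map g).Nodup :=
    (List.nodup_range).map hinj
  have := (hnd2.subperm hsub).length_le
  simp at this

-- B's pre-sorted dictionary, looked up, is A's first-match row, sorted
theorem pvSortedCubes_get?_aux (l : List (Int × List (Int × Int))) :
    ∀ (d : PySem.Dict Int (List Int)) (k : Int),
    (l.foldl (fun d kv =>
      if d.contains kv.1 then d
      else d.insert kv.1 (PySem.List.sorted (kv.2.map Prod.fst) (fun v => v))) d).get? k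
      = ((d.get? k).or (((PySem.Dict.mk l).get? k).map (fun cs => PySem.List.sorted (cs.map Prod.fst) (fun v => v)))) := by
  induction l with
  | nil =>
    intro d k
    have h0 : (PySem.Dict.mk ([] : List (Int × List (Int × Int)))).get? k = none := rfl
    rw [List.foldl_nil, h0, Option.map_none, Option.or_none]
  | cons kv rest ih =>
    intro d k
    rw [List.foldl_cons, ih, PySem.Dict.get?_mk_cons]
    by_cases hc : d.contains kv.1 = true
    · rw [if_pos hc]
      by_cases hk : (kv.1 == k) = true
      · rw [if_pos hk]
        have hkk : kv.1 = k := by simpa using hk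
        subst hkk
        have hs := PySem.Dict.contains_eq_isSome_get? (d := d) (k := kv.1)
        rw [hc] at hs
        rcases Option.isSome_iff_exists.mp hs.symm with ⟨v, hv⟩
        simp [hv]
      · rw [if_neg hk]
    · rw [if_neg hc]
      have hnone : d.get? kv.1 = none := by
        rw [PySem.Dict.get?_eq_none_iff_contains]
        simpa using hc
      by_cases hk : (kv.1 == k) = true
      · rw [if_pos hk]
        have hkk : kv.1 = k := by simpa using hk
        subst hkk
        rw [PySem.Dict.get?_insert, if_pos rfl, hnone]
        simp
      · rw [if_neg hk]
        have hne : k ≠ kv.1 := fun he => by simp [he] at hk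
        rw [PySem.Dict.get?_insert, if_neg hne]

-- on a good rock (some cube below x is ≥ 0, or none below at all), A's pre-collision
-- candidate slot equals B's binary-search one
theorem start_eq (x : Int) (cubes : List (Int × Int))
    (hgood : (cubes.map Prod.fst).filter (fun c => decide (c < x)) = []
           ∨ ∃ c ∈ (cubes.map Prod.fst).filter (fun c => decide (c < x)), 0 ≤ c) :
    (let st := cubes.foldl (fun (st : Bool × Int) (rock : Int × Int) => if rock.1 < x then (false, max st.2 rock.1) else st) (true, (0 : Int));
     if st.1 then st.2 else st.2 + 1)
    = (let xs := PySem.List.sorted (cubes.map Prod.fst) (fun v => v);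
       let lo := pvBisect xs x xs.length 0 xs.length;
       if lo = 0 then 0 else xs.getD (lo - 1) 0 + 1) := by
  simp only [pvFoldA_spec, Bool.true_and]
  set L := cubes.map Prod.fst with hL
  set xs := PySem.List.sorted L (fun v => v) with hxs
  have hperm : xs.Perm L := PySem.List.sorted_perm L (fun v => v) false
  have hpw : xs.Pairwise (· ≤ ·) := PySem.List.sorted_pairwise L (fun v => v)
  set W := xs.takeWhile (fun c => decide (c < x)) with hWdef
  have hWf : xs.filter (fun c => decide (c < x)) = W := filter_eq_takeWhile_of_sorted xs x hpw
  have hWpw : W.Pairwise (· ≤ ·) := hpw.sublist (List.takeWhile_sublist _)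
  have hWxs : W ++ xs.dropWhile (fun c => decide (c < x)) = xs := List.takeWhile_append_dropWhile
  have htle : W.length ≤ xs.length := by
    have := congrArg List.length hWxs
    simp at this
    omega
  have hlo : pvBisect xs x xs.length 0 xs.length = W.length :=
    pvBisect_spec xs x hpw xs.length 0 xs.length (by omega) htle (le_refl _) (by omega)
  have hFperm : (L.filter (fun c => decide (c < x))).Perm W := by
    rw [← hWf]
    exact (hperm.filter _).symm
  simp only [hlo]
  by_cases hW0 : W.length = 0
  · have hWnil : W = [] := List.length_eq_zero_iff.mp hW0
    have hFnil : L.filter (fun c => decide (c < x)) = [] := by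
      have := hFperm
      rw [hWnil] at this
      exact List.Perm.eq_nil this
    simp [hFnil, hW0]
  · have hWne : W ≠ [] := fun hn => hW0 (by rw [hn]; rfl)
    have hFne : L.filter (fun c => decide (c < x)) ≠ [] := by
      intro hn
      rw [hn] at hFperm
      exact hWne hFperm.symm.eq_nil
    have hE : (L.filter (fun c => decide (c < x))).isEmpty = false := by
      simpa [List.isEmpty_iff] using hFne
    rw [if_neg hW0, hE]
    simp only [Bool.false_eq_true, if_false]
    have hfold : (L.filter (fun c => decide (c < x))).foldl max 0 = W.foldl max 0 :=
      @List.Perm.foldl_eq _ _ max _ _ ⟨fun b a1 a2 => max_right_comm b a1 a2⟩ hFperm 0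
    have hmax : W.foldl max 0 = max 0 (W.getLast hWne) := foldl_max_sorted W 0 hWpw hWne
    have hget : xs.getD (W.length - 1) 0 = W.getLast hWne := by
      have hlt : W.length - 1 < xs.length := by omega
      have e : xs[W.length - 1]'hlt = (W ++ xs.dropWhile (fun c => decide (c < x)))[W.length - 1]'(by rw [hWxs]; exact hlt) :=
        List.getElem_of_eq hWxs.symm hlt
      rw [List.getD_eq_getElem?_getD, List.getElem?_eq_getElem hlt]
      simp only [Option.getD_some]
      rw [e, List.getElem_append_left (by omega)]
      exact (List.getLast_eq_getElem hWne).symm ▸ rfl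
    -- the good hypothesis puts some c ≥ 0 in W, so the last (= max) element is ≥ 0
    rcases hgood with hnil | ⟨c, hcF, hc0⟩
    · exact absurd hnil hFne
    · have hcW : c ∈ W := hFperm.mem_iff.mp hcF
      have hlast : 0 ≤ W.getLast hWne := le_trans hc0 (mem_le_getLast_of_sorted W hWpw hWne c hcW)
      rw [hfold, hmax, hget]
      omega

-- one step of A's loop and of B's loop place the same fresh rock (on a good rock)
theorem step_eq (rocks_by_y : List (Int × List (Int × Int))) (acc : PySem.Set (Int × Int))
    (occ : PySem.Dict Int (PySem.Set Int)) (r : Int × Int)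
    (hmem : ∀ p y, (p, y) ∈ acc ↔ p ∈ occ.getD y PySem.Set.empty)
    (hgoodr : pvBadRock rocks_by_y r = false) :
    ∃ p, (p, r.2) ∉ acc ∧
      pvStepA rocks_by_y acc r = acc ++ [(p, r.2)] ∧
      pvPlaceB (pvSortedCubes rocks_by_y) (occ, acc) r
        = (occ.insert r.2 ((occ.getD r.2 PySem.Set.empty) ++ [p]), acc ++ [(p, r.2)]) := by
  obtain ⟨x, y⟩ := r
  have hscget : (pvSortedCubes rocks_by_y).get? y
      = ((PySem.Dict.mk rocks_by_y).get? y).map (fun cs => PySem.List.sorted (cs.map Prod.fst) (fun v => v)) := by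
    rw [pvSortedCubes, pvSortedCubes_get?_aux, PySem.Dict.get?_empty, Option.none_or]
  obtain ⟨stv, hstv⟩ : ∃ stv : Bool × Int,
      (match (PySem.Dict.mk rocks_by_y).get? y with
        | none => (true, (0 : Int))
        | some cubes =>
            cubes.foldl (fun (st : Bool × Int) (rock : Int × Int) => if rock.1 < x then (false, max st.2 rock.1) else st) (true, (0 : Int))) = stv :=
    ⟨_, rfl⟩
  set startv : Int := if stv.1 then stv.2 else stv.2 + 1 with hstartv
  have hstartB :
      (let xs := (pvSortedCubes rocks_by_y).getD y [];
       let lo := pvBisect xs x xs.length 0 xs.length;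
       if lo = 0 then (0 : Int) else xs.getD (lo - 1) 0 + 1) = startv := by
    rw [PySem.Dict.getD_eq_get?_getD, hscget, hstartv, ← hstv]
    cases hg : (PySem.Dict.mk rocks_by_y).get? y with
    | none => simp [pvBisect]
    | some cubes =>
      simp only [Option.map_some, Option.getD_some]
      have hgood : (cubes.map Prod.fst).filter (fun c => decide (c < x)) = []
           ∨ ∃ c ∈ (cubes.map Prod.fst).filter (fun c => decide (c < x)), 0 ≤ c := by
        have hb := hgoodr
        rw [pvBadRock] at hb
        rw [hg] at hb
        simp only [Bool.and_eq_false_iff, Bool.not_eq_false', List.isEmpty_iff,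
          List.all_eq_false] at hb
        rcases hb with hnil | ⟨c, hcF, hc⟩
        · exact Or.inl hnil
        · refine Or.inr ⟨c, hcF, ?_⟩
          simpa using hc
      exact (start_eq x cubes hgood).symm
  set row := occ.getD y PySem.Set.empty with hrow
  have hm : ∀ p : Int, (p, y) ∈ acc ↔ p ∈ row := fun p => hmem p y
  obtain ⟨nA, hnA, hfA⟩ := exists_free acc (fun n => (startv + (n : Int), y))
    (fun a b hab => by simpa using hab)
  obtain ⟨nB, hnB, hfB⟩ := exists_free row (fun n => startv + (n : Int))
    (fun a b hab => by simpa using hab)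
  have hfB' : (startv + (nB : Int), y) ∉ acc := fun hc => hfB ((hm _).1 hc)
  have hex : ∃ n : Nat, (startv + (n : Int), y) ∉ acc := ⟨nA, hfA⟩
  have hfree0 : (startv + (Nat.find hex : Int), y) ∉ acc := Nat.find_spec hex
  have hle1 : Nat.find hex ≤ nA := Nat.find_min' hex hfA
  have hle2 : Nat.find hex ≤ nB := Nat.find_min' hex hfB'
  have hpe : pvProbeA acc y (acc.length + 1) startv = pvProbeB row (row.length + 1) startv :=
    probe_eq acc row y hm (Nat.find hex) startv (acc.length + 1) (row.length + 1) (by omega) (by omega) hfree0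
  have hpf : (pvProbeA acc y (acc.length + 1) startv, y) ∉ acc :=
    probeA_free acc y (Nat.find hex) startv (acc.length + 1) (by omega) hfree0
  refine ⟨pvProbeA acc y (acc.length + 1) startv, hpf, ?_, ?_⟩
  · simp only [pvStepA, hstv]
    by_cases hb : stv.1
    · have hs2 : startv = stv.2 := by rw [hstartv, if_pos hb]
      rw [if_pos hb, ← hs2, PySem.Set.add_of_not_mem hpf]
    · have hs2 : startv = stv.2 + 1 := by rw [hstartv, if_neg hb]
      rw [if_neg hb, ← hs2, PySem.Set.add_of_not_mem hpf]
  · simp only [pvPlaceB]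
    rw [hstartB, ← hrow, ← hpe]
    have hrfree : pvProbeA acc y (acc.length + 1) startv ∉ row := fun hc => hpf ((hm _).2 hc)
    rw [PySem.Set.add_of_not_mem hrfree, PySem.Set.add_of_not_mem hpf]

-- the loops stay in lockstep: A's set equals B's output list under the occupancy invariant
theorem main_fold (rocks_by_y : List (Int × List (Int × Int))) :
    ∀ (rocks : List (Int × Int)) (acc : PySem.Set (Int × Int)) (occ : PySem.Dict Int (PySem.Set Int)),
      (∀ r ∈ rocks, pvBadRock rocks_by_y r = false) →
      (∀ p y, (p, y) ∈ acc ↔ p ∈ occ.getD y PySem.Set.empty) →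
      rocks.foldl (pvStepA rocks_by_y) acc
        = (rocks.foldl (pvPlaceB (pvSortedCubes rocks_by_y)) (occ, acc)).2 := by
  intro rocks
  induction rocks with
  | nil => intro acc occ _ _; rfl
  | cons r rest ih =>
    intro acc occ hgood hmem
    obtain ⟨p, hfresh, hA, hB⟩ := step_eq rocks_by_y acc occ r hmem (hgood r (List.mem_cons_self))
    rw [List.foldl_cons, List.foldl_cons, hA, hB]
    apply ih _ _ (fun r' hr' => hgood r' (List.mem_cons_of_mem _ hr'))
    intro q z
    rw [PySem.Dict.getD_insert]
    by_cases hz : z = r.2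
    · subst hz
      rw [if_pos rfl]
      constructor
      · intro hq
        rcases List.mem_append.1 hq with hq | hq
        · exact List.mem_append.2 (Or.inl ((hmem q r.2).1 hq))
        · simp at hq
          simp [hq]
      · intro hq
        rcases List.mem_append.1 hq with hq | hq
        · exact List.mem_append.2 (Or.inl ((hmem q r.2).2 hq))
        · simp at hq
          simp [hq]
    · rw [if_neg hz]
      constructor
      · intro hq
        rcases List.mem_append.1 hq with hq | hq
        · exact (hmem q z).1 hq
        · simp at hq
          exact absurd hq.2 hz
      · intro hq
        exact List.mem_append.2 (Or.inl ((hmem q z).2 hq))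

-- ===== VERDICT (by name: the statement is the Claim_ definition above) =====
theorem move_rocks_north_spec : Claim_unchanged_move_rocks_north := by
  intro round_rocks rocks_by_y _hdom hnd
  rw [move_rocks_north, move_rocks_north_alt]
  apply main_fold
  · intro r hr
    by_contra hcon
    exact hnd (List.any_eq_true.2 ⟨r, hr, by simpa using hcon⟩)
  · intro p y
    rw [PySem.Dict.getD_empty]
    simp [PySem.Set.empty]

theorem move_rocks_north_changed : Claim_changed_move_rocks_north := by
  unfold Claim_changed_move_rocks_north; decide
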